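-- pv_equiv track=rewrite | github.com/JersheSape/Sape_Functions | Sape_Lab12.py | calcutotal
-- ===== SOURCE A (Python) =====
-- def calcutotal(selectedlist):
--     if not selectedlist:
--         return selectedlist
--     else:
--         total = 0
--         for x in selectedlist:
--             if x == 1:
--                 total += 50
--             if x == 2:
--                 total += 60
--             if x == 3:
--                 total += 70
--             if x == 4:
--                 total += 80
--             if x == 5:
--                 total += 90
--         return total
-- ===== SOURCE B (Python) =====
-- from collections import Counter
--
-- PRICE = {1: 50, 2: 60, 3: 70, 4: 80, 5: 90}
--
-- def calcutotal(selectedlist):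
--     if not selectedlist:
--         return selectedlist
--     counts = Counter(selectedlist)
--     return sum(counts[v] * PRICE[v] for v in (1, 2, 3, 4, 5))
-- ===== Notes on version B (the rewrite author's own statement) =====
-- stated objective: simpler
-- what changed: Replaces the per-element five-branch cascade by a one-pass frequency Counter followed by a weighted sum over the five fixed price keys.
-- outside the precondition, e.g. on calcutotal([]): A returns [], B returns []
import Mathlib
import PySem

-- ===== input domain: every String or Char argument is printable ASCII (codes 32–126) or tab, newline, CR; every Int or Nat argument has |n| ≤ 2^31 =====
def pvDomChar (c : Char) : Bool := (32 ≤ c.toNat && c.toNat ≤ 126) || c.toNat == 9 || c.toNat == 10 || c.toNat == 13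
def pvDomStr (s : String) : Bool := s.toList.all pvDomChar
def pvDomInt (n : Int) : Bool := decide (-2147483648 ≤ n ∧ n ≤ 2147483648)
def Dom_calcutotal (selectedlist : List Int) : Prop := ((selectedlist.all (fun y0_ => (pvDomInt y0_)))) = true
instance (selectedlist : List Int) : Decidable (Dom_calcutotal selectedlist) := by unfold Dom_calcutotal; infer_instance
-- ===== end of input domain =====

-- B replaces A's per-element five-branch cascade by a one-pass Counter and a weighted sum
-- over the five fixed price keys (objective: simpler).

-- ===== PORT A =====
-- On [] Python A returns the empty list itself (not an int); Pre_ excludes [],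
-- so the port's value there ([] branch returns 0) is outside the claim.
def calcutotal (selectedlist : List Int) : Int :=
  if selectedlist = [] then 0
  else
    selectedlist.foldl (fun total x =>
      let total := if x == 1 then total + 50 else total
      let total := if x == 2 then total + 60 else total
      let total := if x == 3 then total + 70 else total
      let total := if x == 4 then total + 80 else total
      let total := if x == 5 then total + 90 else total
      total) 0

-- ===== PORT B =====
-- PRICE = {1:50, 2:60, 3:70, 4:80, 5:90}
def pvPrice : PySem.Dict Int Int :=
  (((((PySem.Dict.empty.insert 1 50).insert 2 60).insert 3 70).insert 4 80).insert 5 90)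

def calcutotal_alt (selectedlist : List Int) : Int :=
  if selectedlist = [] then 0
  else
    let counts := PySem.Dict.counter selectedlist
    ([1, 2, 3, 4, 5] : List Int).foldl
      (fun acc v => acc + counts.getD v 0 * pvPrice.getD v 0) 0

-- ===== PRECONDITION & SPEC =====
-- Pre_ excludes only the empty list, on which Python A returns the list itself (not an int).
def Pre_calcutotal (selectedlist : List Int) : Prop := selectedlist ≠ []
instance (selectedlist : List Int) : Decidable (Pre_calcutotal selectedlist) := by unfold Pre_calcutotal; infer_instance
def pvWitness_calcutotal : List Int := ([1, 3, 7])

def Spec_calcutotal (selectedlist : List Int) (out : Int) : Prop := out = calcutotal_alt selectedlist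
instance (selectedlist : List Int) (out : Int) : Decidable (Spec_calcutotal selectedlist out) := by unfold Spec_calcutotal; infer_instance

-- ===== CLAIM (what is proved, stated in full; the proofs are below) =====
def Claim_equal_calcutotal : Prop := ∀ (selectedlist : List Int), Dom_calcutotal selectedlist → Pre_calcutotal selectedlist → Spec_calcutotal selectedlist (calcutotal selectedlist)

-- ===== LEMMAS AND PROOFS =====

-- A's fold equals the weighted counts, generalized over the accumulator.
theorem calcutotal_foldl_eq (l : List Int) (t : Int) :
    l.foldl (fun total x =>
      let total := if x == 1 then total + 50 else total
      let total := if x == 2 then total + 60 else total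
      let total := if x == 3 then total + 70 else total
      let total := if x == 4 then total + 80 else total
      let total := if x == 5 then total + 90 else total
      total) t
    = t + 50 * l.count 1 + 60 * l.count 2 + 70 * l.count 3 + 80 * l.count 4 + 90 * l.count 5 := by
  induction l generalizing t with
  | nil => simp
  | cons x xs ih =>
      simp only [List.foldl_cons, List.count_cons, ih]
      by_cases h1 : x = 1 <;> by_cases h2 : x = 2 <;> by_cases h3 : x = 3 <;>
        by_cases h4 : x = 4 <;> by_cases h5 : x = 5 <;>
        simp [h1, h2, h3, h4, h5] <;> push_cast <;> ring

theorem calcutotal_spec : Claim_equal_calcutotal := by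
  intro l _ hpre
  unfold Spec_calcutotal calcutotal calcutotal_alt
  rw [if_neg hpre, if_neg hpre]
  simp only [List.foldl_cons, List.foldl_nil, PySem.Dict.getD_counter]
  rw [calcutotal_foldl_eq]
  have p1 : pvPrice.getD 1 0 = 50 := by decide
  have p2 : pvPrice.getD 2 0 = 60 := by decide
  have p3 : pvPrice.getD 3 0 = 70 := by decide
  have p4 : pvPrice.getD 4 0 = 80 := by decide
  have p5 : pvPrice.getD 5 0 = 90 := by decide
  rw [p1, p2, p3, p4, p5]
  ring
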